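-- pv_equiv track=rewrite | github.com/akhilkammila/leetcode-screenshotter | editorial_code/1000-1999/1457. Pseudo-Palindromic Paths in a Binary Tree/python3-0.py | check_palindrom
-- ===== SOURCE A (Python) =====
-- def check_palindrom(nums):
--     is_palindrom = 0
--
--     for i in range(1, 10):
--         if nums.count(i) % 2 == 1:
--             is_palindrom += 1
--             if is_palindrom > 1:
--                 return False
--
--     return True
-- ===== SOURCE B (Python) =====
-- def check_palindrom(nums):
--     odd = set()
--     for x in nums:
--         if 1 <= x <= 9:
--             if x in odd:
--                 odd.discard(x)
--             else:
--                 odd.add(x)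
--     return len(odd) <= 1
-- ===== Notes on version B (the rewrite author's own statement) =====
-- stated objective: faster
-- what changed: Replaced the nine independent nums.count scans over the whole list with a single pass that toggles each in-range digit in an odd-parity set and checks its size at the end.
import Mathlib
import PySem

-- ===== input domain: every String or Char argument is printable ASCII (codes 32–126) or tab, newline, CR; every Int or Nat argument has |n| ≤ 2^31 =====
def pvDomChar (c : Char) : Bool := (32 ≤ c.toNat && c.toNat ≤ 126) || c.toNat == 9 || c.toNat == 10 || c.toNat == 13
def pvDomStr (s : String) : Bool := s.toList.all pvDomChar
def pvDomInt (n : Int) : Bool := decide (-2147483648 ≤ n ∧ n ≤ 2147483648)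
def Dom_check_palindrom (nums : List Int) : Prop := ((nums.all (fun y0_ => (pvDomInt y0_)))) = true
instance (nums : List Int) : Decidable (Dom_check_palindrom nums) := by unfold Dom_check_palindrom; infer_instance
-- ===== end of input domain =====

-- B replaces A's nine independent nums.count scans with one pass toggling an odd-parity set (objective: faster, one traversal).

-- ===== PORT A =====
-- 'for i in range(1, 10): …' with the early 'return False' and the running counter is_palindrom
def pvALoop (nums : List Int) : List Int → Int → Bool
  | [], _ => true
  | i :: rest, acc =>
    if PySem.Int.mod ((PySem.List.count nums i : Int)) 2 == 1 then
      if acc + 1 > 1 then false else pvALoop nums rest (acc + 1)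
    else pvALoop nums rest acc

def check_palindrom (nums : List Int) : Bool :=
  pvALoop nums (PySem.List.pyRange 1 10 1) 0

-- ===== PORT B =====
-- one pass: toggle x in the odd-parity set when 1 <= x <= 9
def pvBStep (s : PySem.Set Int) (x : Int) : PySem.Set Int :=
  if 1 ≤ x ∧ x ≤ 9 then
    (if PySem.Set.contains s x then PySem.Set.discard s x else PySem.Set.add s x)
  else s

def check_palindrom_alt (nums : List Int) : Bool :=
  decide (PySem.Set.len (nums.foldl pvBStep PySem.Set.empty) ≤ 1)

-- ===== PRECONDITION & SPEC =====
def Spec_check_palindrom (nums : List Int) (out : Bool) : Prop := out = check_palindrom_alt nums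
instance (nums : List Int) (out : Bool) : Decidable (Spec_check_palindrom nums out) := by unfold Spec_check_palindrom; infer_instance

-- ===== CLAIM (what is proved, stated in full; the proofs are below) =====
def Claim_equal_check_palindrom : Prop := ∀ (nums : List Int), Dom_check_palindrom nums → Spec_check_palindrom nums (check_palindrom nums)

-- ===== LEMMAS AND PROOFS =====

-- the digit test A applies to each i of range(1,10)
def pvOdd (nums : List Int) (i : Int) : Bool :=
  PySem.Int.mod ((PySem.List.count nums i : Int)) 2 == 1

lemma pvOdd_iff (nums : List Int) (i : Int) :
    pvOdd nums i = true ↔ (PySem.List.count nums i) % 2 = 1 := by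
  unfold pvOdd
  rw [show ((PySem.List.count nums i : Int)) = ((PySem.List.count nums i : Nat) : Int) from rfl]
  rw [show (2 : Int) = ((2 : Nat) : Int) from rfl, PySem.Int.mod_natCast]
  simp only [beq_iff_eq]
  omega

-- A's loop counts the odd digits of l on top of acc, stopping at 2
lemma pvALoop_eq (nums : List Int) (l : List Int) (acc : Int)
    (h0 : 0 ≤ acc) (h1 : acc ≤ 1) :
    pvALoop nums l acc = decide ((l.countP (pvOdd nums) : Int) + acc ≤ 1) := by
  induction l generalizing acc with
  | nil => simp [pvALoop]; omega
  | cons i rest ih =>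
    rw [pvALoop]
    by_cases hp : pvOdd nums i = true
    · rw [List.countP_cons_of_pos hp]
      unfold pvOdd at hp
      rw [if_pos hp]
      by_cases ha : acc + 1 > 1
      · rw [if_pos ha]
        symm
        rw [decide_eq_false_iff_not]
        push_cast
        omega
      · rw [if_neg ha, ih (acc + 1) (by omega) (by omega), decide_eq_decide]
        push_cast
        omega
    · rw [List.countP_cons_of_neg hp]
      unfold pvOdd at hp
      rw [if_neg hp, ih acc h0 h1]

-- one toggle step, described by membership
lemma pvBStep_mem (s : PySem.Set Int) (x : Int) (e : Int) :
    e ∈ pvBStep s x ↔ (if e = x ∧ 1 ≤ x ∧ x ≤ 9 then ¬ (e ∈ s) else e ∈ s) := by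
  unfold pvBStep
  by_cases hx : 1 ≤ x ∧ x ≤ 9
  · rw [if_pos hx]
    by_cases hc : PySem.Set.contains s x = true
    · rw [if_pos hc, PySem.Set.mem_discard]
      have hin : x ∈ s := (PySem.Set.contains_iff s x).mp hc
      by_cases hex : e = x
      · subst hex; simp [hin, hx]
      · simp [hex]
    · rw [if_neg hc, PySem.Set.mem_add]
      have hni : x ∉ s := fun h => hc ((PySem.Set.contains_iff s x).mpr h)
      by_cases hex : e = x
      · subst hex; simp [hni, hx]
      · simp [hex]
  · rw [if_neg hx, if_neg (show ¬ (e = x ∧ 1 ≤ x ∧ x ≤ 9) from fun h => hx h.2)]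

-- B's fold: for in-range digits, membership in the running set is the count parity of the
-- processed elements XORed with membership in the starting set; other digits are untouched
lemma pvBFold_mem (nums : List Int) (s : PySem.Set Int) (hs : s.Nodup) :
    (nums.foldl pvBStep s).Nodup ∧
    ∀ d : Int, (d ∈ nums.foldl pvBStep s ↔
      (if 1 ≤ d ∧ d ≤ 9 then ¬ (d ∈ s ↔ (PySem.List.count nums d) % 2 = 1) else d ∈ s)) := by
  induction nums generalizing s with
  | nil =>
    refine ⟨hs, fun d => ?_⟩
    have hc : PySem.List.count ([] : List Int) d = 0 := by simp [PySem.List.count_eq]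
    simp only [List.foldl_nil, hc]
    split_ifs <;> simp
  | cons x rest ih =>
    have hs' : (pvBStep s x).Nodup := by
      unfold pvBStep
      split_ifs
      · exact PySem.Set.nodup_discard s x hs
      · exact PySem.Set.nodup_add s x hs
      · exact hs
    obtain ⟨hn, hm⟩ := ih (pvBStep s x) hs'
    refine ⟨hn, fun d => ?_⟩
    rw [List.foldl_cons, hm d]
    by_cases hd : 1 ≤ d ∧ d ≤ 9
    · rw [if_pos hd, if_pos hd, pvBStep_mem s x d]
      by_cases hdx : d = x
      · subst hdx
        rw [if_pos ⟨rfl, hd⟩]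
        have hcnt : PySem.List.count (d :: rest) d = PySem.List.count rest d + 1 := by
          simp [PySem.List.count_eq]
        rw [hcnt]
        have hpar : (PySem.List.count rest d + 1) % 2 = 1 ↔ ¬ (PySem.List.count rest d % 2 = 1) := by
          omega
        rw [hpar]
        tauto
      · rw [if_neg (show ¬ (d = x ∧ 1 ≤ x ∧ x ≤ 9) from fun h => hdx h.1)]
        have hcnt : PySem.List.count (x :: rest) d = PySem.List.count rest d := by
          simp [PySem.List.count_eq, Ne.symm hdx]
        rw [hcnt]
    · rw [if_neg hd, if_neg hd, pvBStep_mem s x d]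
      rw [if_neg (show ¬ (d = x ∧ 1 ≤ x ∧ x ≤ 9) from by rintro ⟨rfl, h⟩; exact hd h)]

-- the final set's elements are exactly the odd-count digits of range(1,10)
lemma pvLen_eq (nums : List Int) :
    (nums.foldl pvBStep PySem.Set.empty).length
      = ((PySem.List.pyRange 1 10 1).filter (pvOdd nums)).length := by
  obtain ⟨hn, hm⟩ := pvBFold_mem nums PySem.Set.empty List.nodup_nil
  apply List.Perm.length_eq
  rw [List.perm_ext_iff_of_nodup hn ((PySem.List.nodup_pyRange_one 1 10).filter _)]
  intro d
  rw [hm d, List.mem_filter, PySem.List.mem_pyRange_one, pvOdd_iff]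
  have hne : d ∉ (PySem.Set.empty : PySem.Set Int) := List.not_mem_nil
  constructor
  · intro h
    by_cases hd : 1 ≤ d ∧ d ≤ 9
    · rw [if_pos hd] at h
      exact ⟨⟨hd.1, by omega⟩, by tauto⟩
    · rw [if_neg hd] at h
      exact absurd h hne
  · rintro ⟨⟨h1, h2⟩, h3⟩
    rw [if_pos ⟨h1, by omega⟩]
    tauto

-- ===== VERDICT (by name: the statement is the Claim_ definition above) =====
theorem check_palindrom_spec : Claim_equal_check_palindrom := by
  intro nums _
  unfold Spec_check_palindrom check_palindrom check_palindrom_alt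
  rw [pvALoop_eq nums _ 0 le_rfl (by norm_num)]
  have hlen : PySem.Set.len (nums.foldl pvBStep PySem.Set.empty)
      = (((PySem.List.pyRange 1 10 1).filter (pvOdd nums)).length : Int) := by
    simp only [PySem.Set.len]
    exact_mod_cast pvLen_eq nums
  rw [hlen]
  rw [List.countP_eq_length_filter]
  simp
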